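-- pv_equiv track=rewrite | github.com/weerapana-lab/envoMatch | envFinder/main.py | make_of_seq
-- ===== SOURCE A (Python) =====
-- def make_of_seq(seq, mod_str = '*'):
--     if seq[0] in mod_str:
--         raise RuntimeError('{} is an invalid sequence!'.format(seq))
--
--     ret = str()
--     for s in seq:
--         if s in mod_str:
--             ret = ret[:len(ret) - 1] + ret[-1].lower()
--         else: ret += s
--     return ret
-- ===== SOURCE B (Python) =====
-- def make_of_seq(seq, mod_str = '*'):
--     if seq[0] in mod_str:
--         raise RuntimeError('{} is an invalid sequence!'.format(seq))
--
--     out = []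
--     for i, c in enumerate(seq):
--         if c in mod_str:
--             continue
--         if i + 1 < len(seq) and seq[i + 1] in mod_str:
--             out.append(c.lower())
--         else:
--             out.append(c)
--     return ''.join(out)
-- ===== Notes on version B (the rewrite author's own statement) =====
-- stated objective: alternative
-- what changed: B decides each kept character's case up front by a one-character lookahead (skipping modifier chars, lowercasing a char whose successor is a modifier) and joins a list once, instead of A's retroactive slice-and-rebuild of the accumulated string on every modifier.
-- outside the precondition, e.g. on make_of_seq('*AB', '*'): A raises RuntimeError, B raises RuntimeError; on make_of_seq('', '*'): A raises IndexError, B raises IndexError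
import Mathlib
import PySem

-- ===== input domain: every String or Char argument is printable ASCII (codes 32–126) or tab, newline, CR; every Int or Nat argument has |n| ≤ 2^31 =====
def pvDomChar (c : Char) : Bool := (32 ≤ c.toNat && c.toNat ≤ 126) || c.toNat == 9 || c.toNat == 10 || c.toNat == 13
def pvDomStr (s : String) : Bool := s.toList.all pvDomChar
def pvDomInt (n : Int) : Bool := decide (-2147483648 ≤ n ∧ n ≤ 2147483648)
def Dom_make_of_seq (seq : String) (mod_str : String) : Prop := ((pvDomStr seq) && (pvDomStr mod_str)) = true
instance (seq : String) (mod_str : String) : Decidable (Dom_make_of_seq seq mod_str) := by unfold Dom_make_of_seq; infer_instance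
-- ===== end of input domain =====

-- B replaces A's retroactive slice-and-rebuild of the accumulated string by a single
-- lookahead pass (alternative decomposition, same return value on all non-raising inputs).

-- ===== PORT A =====
-- A's loop state: `ret` is the string built so far; on a modifier char, the last char
-- of `ret` is lowered (`ret[:len(ret)-1] + ret[-1].lower()`); otherwise `s` is appended.
-- Under Pre_ `ret` is never empty when a modifier is met, so `ret[-1]` never raises;
-- on empty `ret` Python raises IndexError (outside Pre_), here `getLast?` yields none.
def aLoop (mods : List Char) : List Char → List Char → List Char
  | ret, [] => ret
  | ret, s :: rest =>
    if mods.contains s then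
      aLoop mods (ret.take (ret.length - 1) ++ (ret.getLast?.map Char.toLower).toList) rest
    else
      aLoop mods (ret ++ [s]) rest

def make_of_seq (seq : String) (mod_str : String) : String :=
  match seq.toList with
  | [] => ""            -- seq[0] raises IndexError; excluded by Pre_
  | c :: _ =>
    if mod_str.toList.contains c then ""   -- RuntimeError; excluded by Pre_
    else String.mk (aLoop mod_str.toList [] seq.toList)

-- ===== PORT B =====
-- B's pass: skip modifier chars; append c lowered iff the next char is a modifier.
def bGo (mods : List Char) : List Char → List Char
  | [] => []
  | c :: rest =>
    if mods.contains c then bGo mods rest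
    else
      (match rest with
       | d :: _ => if mods.contains d then c.toLower else c
       | [] => c) :: bGo mods rest

def make_of_seq_alt (seq : String) (mod_str : String) : String :=
  match seq.toList with
  | [] => ""            -- seq[0] raises IndexError; excluded by Pre_
  | c :: _ =>
    if mod_str.toList.contains c then ""   -- RuntimeError; excluded by Pre_
    else String.mk (bGo mod_str.toList seq.toList)

-- ===== PRECONDITION & SPEC =====
-- Pre_ excludes exactly the inputs where A raises: empty seq (IndexError on seq[0])
-- and seq starting with a modifier char (explicit RuntimeError).
def Pre_make_of_seq (seq : String) (mod_str : String) : Prop :=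
  seq.toList ≠ [] ∧ mod_str.toList.contains (seq.toList.headD ' ') = false
instance (seq : String) (mod_str : String) : Decidable (Pre_make_of_seq seq mod_str) := by
  unfold Pre_make_of_seq; infer_instance
def pvWitness_make_of_seq : String × String := ("PEP*TIDE", "*")

def Spec_make_of_seq (seq : String) (mod_str : String) (out : String) : Prop := out = make_of_seq_alt seq mod_str
instance (seq : String) (mod_str : String) (out : String) : Decidable (Spec_make_of_seq seq mod_str out) := by unfold Spec_make_of_seq; infer_instance

-- ===== CLAIM (what is proved, stated in full; the proofs are below) =====
def Claim_equal_make_of_seq : Prop := ∀ (seq : String) (mod_str : String), Dom_make_of_seq seq mod_str → Pre_make_of_seq seq mod_str → Spec_make_of_seq seq mod_str (make_of_seq seq mod_str)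

-- ===== LEMMAS AND PROOFS =====

theorem toLower_idem (c : Char) : c.toLower.toLower = c.toLower := by
  simp only [Char.toLower]
  split_ifs with h1 h2 <;> try rfl
  · exfalso
    obtain ⟨a1, a2⟩ := h1
    obtain ⟨b1, b2⟩ := h2
    simp only [UInt32.le_iff_toNat_le, UInt32.toNat_add, UInt32.toNat_sub] at a1 a2 b1 b2
    have e1 : 'A'.val.toNat = 65 := by decide
    have e2 : 'Z'.val.toNat = 90 := by decide
    have e3 : 'a'.val.toNat = 97 := by decide
    simp only [e1, e2, e3] at a1 a2 b1 b2
    omega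

-- what B contributes for a pending kept char `c` followed by the unprocessed tail `cs`
def pend (mods : List Char) (c : Char) (cs : List Char) : List Char :=
  (match cs with
   | d :: _ => if mods.contains d then c.toLower else c
   | [] => c) :: bGo mods cs

theorem aLoop_pend (mods : List Char) (cs : List Char) :
    ∀ (ret : List Char) (c : Char),
      aLoop mods (ret ++ [c]) cs = ret ++ pend mods c cs := by
  induction cs with
  | nil => intro ret c; simp [aLoop, pend, bGo]
  | cons d rest ih =>
    intro ret c
    by_cases hd : mods.contains d
    · have hstep : (ret ++ [c]).take ((ret ++ [c]).length - 1)
          ++ (((ret ++ [c]).getLast?).map Char.toLower).toList = ret ++ [c.toLower] := by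
        have hlen : (ret ++ [c]).length - 1 = ret.length := by simp
        rw [hlen, List.take_left, List.getLast?_concat]
        rfl
      rw [aLoop, if_pos hd, hstep, ih ret c.toLower]
      simp [pend, bGo, hd, toLower_idem]
      split <;> simp_all
    · have hd' : d ∉ mods := by simpa using hd
      rw [aLoop, if_neg hd]
      have := ih (ret ++ [c]) d
      simp only [List.append_assoc, List.singleton_append] at this ⊢
      rw [this]
      simp [pend, bGo, hd']

-- ===== VERDICT (by name: the statement is the Claim_ definition above) =====
theorem make_of_seq_spec : Claim_equal_make_of_seq := by
  intro seq mod_str _hdom hpre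
  obtain ⟨hne, hhead⟩ := hpre
  unfold Spec_make_of_seq make_of_seq make_of_seq_alt
  cases h : seq.toList with
  | nil => exact absurd h hne
  | cons c rest =>
    rw [h] at hhead
    simp only [List.headD_cons] at hhead
    have hc : c ∉ mod_str.toList := by simpa using hhead
    have hstart : aLoop mod_str.toList [] (c :: rest) = [] ++ pend mod_str.toList c rest := by
      rw [aLoop, if_neg (by simpa using hc)]
      exact aLoop_pend mod_str.toList rest [] c
    simp only [h, hstart]
    simp [pend, bGo, hc, hhead]
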